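-- pv_equiv track=rewrite | github.com/Tievoo/aed3-uba | Guias/Guia 3/ej17.py | aristasUnicas
-- ===== SOURCE A (Python) =====
-- def aristasUnicas(E):
--     # quiero primero recorrer E y dejar el elemento mas chico de cada arista como el primer elemento de la tupla
--     # para poder compararlos de manera mas facil
--     E = [tuple(sorted(e)) for e in E] # O(n)
--     E = sorted(E, key=lambda x: (x[1], x[0])) # Asumo que sorted es un radix sort, O(n)
--     ret = []
--
--     i = 0
--     while i < len(E): # O(n) worst case
--         if i == len(E) - 1:
--             ret.append(E[i])
--             break
--         if E[i] != E[i+1]: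
--             ret.append(E[i])
--         i += 1
--     return ret
-- ===== SOURCE B (Python) =====
-- def aristasUnicas(E):
--     unicas = {(min(a, b), max(a, b)) for a, b in E}
--     return sorted(unicas, key=lambda x: (x[1], x[0]))
-- ===== Notes on version B (the rewrite author's own statement) =====
-- stated objective: idiomatic
-- what changed: Deduplicates by inserting (min,max)-normalized edges into a set comprehension and sorts only the deduplicated set, instead of sorting the whole list and scanning adjacent pairs with an index-based while loop.
import Mathlib
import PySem

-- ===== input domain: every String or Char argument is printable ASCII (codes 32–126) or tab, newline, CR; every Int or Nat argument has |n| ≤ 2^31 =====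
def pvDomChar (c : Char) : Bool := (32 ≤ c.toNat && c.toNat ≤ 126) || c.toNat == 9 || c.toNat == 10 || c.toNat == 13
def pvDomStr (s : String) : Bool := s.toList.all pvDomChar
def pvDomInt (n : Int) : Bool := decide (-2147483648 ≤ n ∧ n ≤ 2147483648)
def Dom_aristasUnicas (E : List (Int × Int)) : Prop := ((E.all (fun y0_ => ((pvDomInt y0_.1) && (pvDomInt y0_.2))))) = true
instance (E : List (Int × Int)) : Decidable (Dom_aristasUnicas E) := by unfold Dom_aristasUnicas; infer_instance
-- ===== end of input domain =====

-- B deduplicates with a set of (min,max)-normalized edges and sorts only the set,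
-- replacing A's sort-everything-then-adjacent-scan while loop; return values are identical.

-- ===== PORT A =====
-- tuple(sorted(e)) on a pair: stable two-element sort, swaps only when e[1] < e[0]
def pvNormA (e : Int × Int) : Int × Int := if e.2 < e.1 then (e.2, e.1) else (e.1, e.2)

-- the while loop over index i, transcribed as recursion on the suffix E[i:] (state i ↦ suffix)
def pvLoopA (l : List (Int × Int)) (ret : List (Int × Int)) : List (Int × Int) :=
  match l with
  | [] => ret
  | [x] => ret ++ [x]                              -- i == len(E) - 1: append and break
  | x :: y :: t =>
      if x ≠ y then pvLoopA (y :: t) (ret ++ [x])  -- E[i] != E[i+1]: append E[i]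
      else pvLoopA (y :: t) ret

def aristasUnicas (E : List (Int × Int)) : List (Int × Int) :=
  let E1 := E.map pvNormA
  let E2 := PySem.List.sorted2 E1 (fun x => x.2) (fun x => x.1)
  pvLoopA E2 []

-- ===== PORT B =====
def pvNormB (e : Int × Int) : Int × Int := (min e.1 e.2, max e.1 e.2)

def aristasUnicas_alt (E : List (Int × Int)) : List (Int × Int) :=
  PySem.List.sorted2 (PySem.Set.ofList (E.map pvNormB)) (fun x => x.2) (fun x => x.1)

-- ===== PRECONDITION & SPEC =====
def Spec_aristasUnicas (E : List (Int × Int)) (out : List (Int × Int)) : Prop := out = aristasUnicas_alt E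
instance (E : List (Int × Int)) (out : List (Int × Int)) : Decidable (Spec_aristasUnicas E out) := by unfold Spec_aristasUnicas; infer_instance

-- ===== CLAIM (what is proved, stated in full; the proofs are below) =====
def Claim_equal_aristasUnicas : Prop := ∀ (E : List (Int × Int)), Dom_aristasUnicas E → Spec_aristasUnicas E (aristasUnicas E)

-- ===== LEMMAS AND PROOFS =====

-- the (x[1], x[0]) sort key, packaged as a single lexicographic key
def pvKey (x : Int × Int) : Lex (Int × Int) := toLex (x.2, x.1)

theorem pvKey_inj {a b : Int × Int} (h : pvKey a = pvKey b) : a = b := by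
  unfold pvKey at h
  have h' : (a.2, a.1) = (b.2, b.1) := toLex.injective h
  have h1 : a.2 = b.2 := congrArg Prod.fst h'
  have h2 : a.1 = b.1 := congrArg Prod.snd h'
  exact Prod.ext h2 h1

theorem norm_eq (e : Int × Int) : pvNormA e = pvNormB e := by
  unfold pvNormA pvNormB
  rcases e with ⟨a, b⟩
  by_cases h : b < a <;> simp [h, Prod.ext_iff] <;> omega

theorem sorted2_as_sorted (xs : List (Int × Int)) :
    PySem.List.sorted2 xs (fun x => x.2) (fun x => x.1) = PySem.List.sorted xs pvKey := by
  have hfun : (fun (a b : Int × Int) => decide (a.2 < b.2) || (!decide (b.2 < a.2) && decide (a.1 < b.1)))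
      = (fun a b => decide (pvKey a < pvKey b)) := by
    funext a b
    rw [Bool.eq_iff_iff]
    simp only [Bool.or_eq_true, Bool.and_eq_true, Bool.not_eq_true', decide_eq_true_eq,
      decide_eq_false_iff_not, pvKey, Prod.Lex.lt_iff, ofLex_toLex]
    omega
  unfold PySem.List.sorted2 PySem.List.sorted
  simp only [Bool.false_eq_true, if_false, hfun]

theorem mem_pvLoopA (l ret : List (Int × Int)) (a : Int × Int) :
    a ∈ pvLoopA l ret ↔ a ∈ ret ∨ a ∈ l := by
  induction l generalizing ret with
  | nil => simp [pvLoopA]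
  | cons x t ih =>
    cases t with
    | nil => simp [pvLoopA]
    | cons y t' =>
      by_cases h : x = y
      · subst h
        rw [pvLoopA, if_neg (fun hc => hc rfl), ih]
        simp only [List.mem_cons]
        tauto
      · rw [pvLoopA, if_pos h, ih]
        simp only [List.mem_append, List.mem_cons]
        tauto

theorem pvLoopA_pairwise (l ret : List (Int × Int))
    (hl : l.Pairwise (fun a b => pvKey a ≤ pvKey b))
    (hret : ret.Pairwise (fun a b => pvKey a < pvKey b))
    (hcross : ∀ r ∈ ret, ∀ s ∈ l, pvKey r < pvKey s) :
    (pvLoopA l ret).Pairwise (fun a b => pvKey a < pvKey b) := by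
  induction l generalizing ret with
  | nil => exact hret
  | cons x t ih =>
    cases t with
    | nil =>
      simp only [pvLoopA]
      refine List.pairwise_append.mpr ⟨hret, List.pairwise_singleton _ _, ?_⟩
      intro r hr s hs
      rw [List.mem_singleton.mp hs]
      exact hcross r hr x (List.mem_singleton.mpr rfl)
    | cons y t' =>
      rcases List.pairwise_cons.mp hl with ⟨hx, hl'⟩
      by_cases h : x = y
      · subst h
        rw [pvLoopA, if_neg (fun hc => hc rfl)]
        exact ih ret hl' hret (fun r hr s hs => hcross r hr s (List.mem_cons_of_mem _ hs))
      · rw [pvLoopA, if_pos h]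
        have hxy : pvKey x < pvKey y := by
          refine lt_of_le_of_ne (hx y (by simp)) ?_
          intro he; exact h (pvKey_inj he)
        refine ih (ret ++ [x]) hl' ?_ ?_
        · refine List.pairwise_append.mpr ⟨hret, List.pairwise_singleton _ _, ?_⟩
          intro r hr s hs
          rw [List.mem_singleton.mp hs]
          exact hcross r hr x (by simp)
        · intro r hr s hs
          rcases List.mem_append.mp hr with hr' | hr'
          · exact hcross r hr' s (List.mem_cons_of_mem _ hs)
          · rw [List.mem_singleton.mp hr']
            rcases List.mem_cons.mp hs with hs' | hs'
            · rw [hs']; exact hxy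
            · rcases List.pairwise_cons.mp hl' with ⟨hy, _⟩
              exact lt_of_lt_of_le hxy (hy s hs')

theorem pvLoopA_nodup (l ret : List (Int × Int))
    (h : (pvLoopA l ret).Pairwise (fun a b => pvKey a < pvKey b)) :
    (pvLoopA l ret).Nodup :=
  h.imp (fun hlt he => absurd (he ▸ hlt) (lt_irrefl _))

-- ===== VERDICT (by name: the statement is the Claim_ definition above) =====
theorem aristasUnicas_spec : Claim_equal_aristasUnicas := by
  intro E _
  have hmap : E.map pvNormB = E.map pvNormA := by
    simp [norm_eq]
  set ys := E.map pvNormA with hys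
  set S := PySem.List.sorted ys pvKey with hS
  have hA : aristasUnicas E = pvLoopA (PySem.List.sorted2 ys (fun x => x.2) (fun x => x.1)) [] := rfl
  have hB : aristasUnicas_alt E = PySem.List.sorted2 (PySem.Set.ofList (E.map pvNormB)) (fun x => x.2) (fun x => x.1) := rfl
  rw [sorted2_as_sorted] at hA
  rw [sorted2_as_sorted, hmap] at hB
  show aristasUnicas E = aristasUnicas_alt E
  rw [hA, hB]
  have hpw : (pvLoopA S []).Pairwise (fun a b => pvKey a < pvKey b) :=
    pvLoopA_pairwise S [] (PySem.List.sorted_pairwise ys pvKey) (List.Pairwise.nil) (by simp)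
  have hperm : (pvLoopA S []).Perm (PySem.Set.ofList ys) := by
    refine (List.perm_ext_iff_of_nodup (pvLoopA_nodup S [] hpw) (PySem.Set.nodup_ofList ys)).mpr ?_
    intro a
    rw [mem_pvLoopA, PySem.Set.mem_ofList, hS, PySem.List.mem_sorted]
    simp
  exact (PySem.List.sorted_eq_of_perm_of_pairwise_lt _ _ pvKey hperm hpw).symm
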